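-- pv_equiv track=rewrite | github.com/cokemania2/LeetCode | 프로그래머스/3/64064. 불량 사용자/불량 사용자.py | solution
-- ===== SOURCE A (Python) =====
-- from itertools import product
--
-- def can_ban(u_id, b_id):
--     for i in range(len(b_id)):
--         if b_id[i] != "*" and u_id[i] != b_id[i]:
--             return False
--     return True
--
-- def get_unique_combinations(data):
--     unique_results = set()
--
--     for combination in product(*data):
--         if len(set(combination)) == len(combination):  # 중복 체크
--             unique_results.add(tuple(sorted(combination)))  # 정렬 후 추가
--
--     return list(unique_results)
--
-- def solution(user_id, banned_id):
--     jejes = []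
--     for b in banned_id:
--         b_list = [] # 밴 가능한 목록
--         b_length = len(b)
--         for u in user_id:
--             if b_length == len(u) and can_ban(u, b):
--                 b_list.append(u)
--         jejes.append(b_list)
--
--     return len(get_unique_combinations(jejes))
-- ===== SOURCE B (Python) =====
-- def solution(user_id, banned_id):
--     # Backtracking: assign a distinct user to each banned pattern, pruning
--     # already-used users, then count the distinct (sorted) user sets.
--     cands = [[u for u in user_id
--               if len(u) == len(b)
--               and all(bc == "*" or uc == bc for uc, bc in zip(u, b))]
--              for b in banned_id]
--     results = set()
--
--     def bt(rest, used):
--         if not rest: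
--             results.add(tuple(sorted(used)))
--             return
--         for u in rest[0]:
--             if u not in used:
--                 bt(rest[1:], used + [u])
--
--     bt(cands, [])
--     return len(results)
-- ===== Notes on version B (the rewrite author's own statement) =====
-- stated objective: faster
-- what changed: replaces exhaustive iteration over the full cartesian product (filtering duplicate-containing tuples afterwards) with depth-first backtracking that skips already-used users at each level, so branches with repeated users are pruned instead of enumerated; intended as faster (a timing run saw A time out where B returned but could not measure a ratio)
import Mathlib
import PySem

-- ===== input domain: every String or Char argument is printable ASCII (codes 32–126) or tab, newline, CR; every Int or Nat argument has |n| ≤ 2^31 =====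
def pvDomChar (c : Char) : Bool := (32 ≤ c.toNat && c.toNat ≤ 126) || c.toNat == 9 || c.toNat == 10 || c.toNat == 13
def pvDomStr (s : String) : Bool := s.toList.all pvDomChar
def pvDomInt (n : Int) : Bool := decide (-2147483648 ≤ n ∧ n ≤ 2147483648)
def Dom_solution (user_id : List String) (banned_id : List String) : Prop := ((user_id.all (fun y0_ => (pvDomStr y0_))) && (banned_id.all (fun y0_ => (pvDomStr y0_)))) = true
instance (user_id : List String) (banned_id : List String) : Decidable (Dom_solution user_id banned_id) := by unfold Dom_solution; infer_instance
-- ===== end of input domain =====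

-- B replaces A's full cartesian-product enumeration with depth-first backtracking that
-- skips already-used users at each level; intended as faster (a timing run saw A time
-- out at sizes where B still returned, but could not measure a ratio).

-- ===== PORT A =====
-- can_ban(u_id, b_id): the index loop returning False on a mismatch is the 'all' over range(len(b))
-- (getD never falls back to its default: solution only calls it with len(u) == len(b))
def canBan (u b : List Char) : Bool :=
  (List.range b.length).all (fun i => !(b.getD i '*' != '*' && u.getD i '*' != b.getD i '*'))

-- itertools.product(*data), ported by hand (exact: CPython's order, rightmost factor varies fastest)
def pyProduct (data : List (List String)) : List (List String) :=
  match data with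
  | [] => [[]]
  | xs :: rest => xs.flatMap (fun x => (pyProduct rest).map (fun c => x :: c))

-- get_unique_combinations(data), kept as the set (its length is all solution uses of the returned list)
def uniqueCombinations (data : List (List String)) : PySem.Set (List String) :=
  (pyProduct data).foldl
    (fun s comb =>
      if (PySem.Set.ofList comb).length == comb.length then
        PySem.Set.add s (PySem.List.sorted comb (fun x => x) false)
      else s)
    []

def solution (user_id : List String) (banned_id : List String) : Int :=
  let jejes := banned_id.foldl
    (fun js b =>
      js ++ [user_id.foldl
        (fun bl u =>
          if PySem.Str.len b == PySem.Str.len u && canBan u.toList b.toList then bl ++ [u]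
          else bl)
        []])
    []
  ((uniqueCombinations jejes).length : Int)

-- ===== PORT B =====
def matchPat (u b : List Char) : Bool :=
  (u.zip b).all (fun p => p.2 == '*' || p.1 == p.2)

-- bt(rest, used): DFS emitting one sorted assignment per completed branch, in DFS order
def btRec (rest : List (List String)) (used : List String) : List (List String) :=
  match rest with
  | [] => [PySem.List.sorted used (fun x => x) false]
  | c :: cs => (c.filter (fun u => !used.contains u)).flatMap (fun u => btRec cs (used ++ [u]))

def solution_alt (user_id : List String) (banned_id : List String) : Int :=
  let cands := banned_id.map (fun b =>
    user_id.filter (fun u =>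
      PySem.Str.len u == PySem.Str.len b && matchPat u.toList b.toList))
  ((PySem.Set.ofList (btRec cands [])).length : Int)

-- ===== PRECONDITION & SPEC =====
def Spec_solution (user_id : List String) (banned_id : List String) (out : Int) : Prop := out = solution_alt user_id banned_id
instance (user_id : List String) (banned_id : List String) (out : Int) : Decidable (Spec_solution user_id banned_id out) := by unfold Spec_solution; infer_instance

-- ===== CLAIM (what is proved, stated in full; the proofs are below) =====
def Claim_equal_solution : Prop := ∀ (user_id : List String) (banned_id : List String), Dom_solution user_id banned_id → Spec_solution user_id banned_id (solution user_id banned_id)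

-- ===== LEMMAS AND PROOFS =====

-- can_ban agrees with the zip-based matcher on equal-length strings
theorem canBan_eq_matchPat (u b : List Char) (h : u.length = b.length) :
    canBan u b = matchPat u b := by
  have h1 : canBan u b = true ↔ ∀ i (_ : i < b.length),
      (b[i] = '*' ∨ u[i] = b[i]) := by
    simp only [canBan, List.all_eq_true, List.mem_range]
    constructor
    · intro H i hi
      have := H i hi
      rw [List.getD_eq_getElem b '*' hi, List.getD_eq_getElem u '*' (h ▸ hi)] at this
      simp only [Bool.not_and, Bool.or_eq_true, Bool.not_eq_true', bne_eq_false_iff_eq] at this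
      tauto
    · intro H i hi
      have := H i hi
      rw [List.getD_eq_getElem b '*' hi, List.getD_eq_getElem u '*' (h ▸ hi)]
      simp only [Bool.not_and, Bool.or_eq_true, Bool.not_eq_true', bne_eq_false_iff_eq]
      tauto
  have h2 : matchPat u b = true ↔ ∀ i (_ : i < b.length),
      (b[i] = '*' ∨ u[i] = b[i]) := by
    simp only [matchPat, List.all_eq_true]
    constructor
    · intro H i hi
      have hz : i < (u.zip b).length := by simp [List.length_zip, h]; omega
      have := H ((u.zip b)[i]'hz) (List.getElem_mem hz)
      rw [List.getElem_zip] at this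
      simpa using this
    · intro H p hp
      obtain ⟨i, hi, rfl⟩ := List.mem_iff_getElem.mp hp
      rw [List.getElem_zip]
      have hib : i < b.length := by simp [List.length_zip, h] at hi; omega
      simpa using H i hib
  exact Bool.eq_iff_iff.mpr (h1.trans h2.symm)

-- the two candidate predicates coincide on every pair of strings
theorem pred_eq (u b : String) :
    (PySem.Str.len b == PySem.Str.len u && canBan u.toList b.toList)
      = (PySem.Str.len u == PySem.Str.len b && matchPat u.toList b.toList) := by
  by_cases h : u.toList.length = b.toList.length
  · rw [canBan_eq_matchPat _ _ h]
    have : (PySem.Str.len b == PySem.Str.len u) = (PySem.Str.len u == PySem.Str.len b) := by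
      simp [PySem.Str.len_eq, -String.length_toList, eq_comm]
    rw [this]
  · have h1 : (PySem.Str.len b == PySem.Str.len u) = false := by
      simp [PySem.Str.len_eq, -String.length_toList]; omega
    have h2 : (PySem.Str.len u == PySem.Str.len b) = false := by
      simp [PySem.Str.len_eq, -String.length_toList]; omega
    rw [h1, h2, Bool.false_and, Bool.false_and]

-- a list with a repeat loses length under set()
theorem ofList_length_lt (c : List String) (hc : ¬ c.Nodup) :
    (PySem.Set.ofList c).length < c.length := by
  induction c with
  | nil => simp at hc
  | cons x xs ih =>
    rw [PySem.Set.ofList_cons]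
    simp only [List.length_cons, List.nodup_cons, not_and_or] at hc ⊢
    have hnd : ((PySem.Set.ofList xs).discard x).Nodup :=
      PySem.Set.nodup_discard _ x (PySem.Set.nodup_ofList xs)
    rcases hc with hx | hxs
    · push Not at hx
      have hsub' : (PySem.Set.ofList xs).discard x ⊆ xs.erase x := by
        intro y hy
        obtain ⟨hy1, hy2⟩ := (PySem.Set.mem_discard _ x y).mp hy
        exact List.mem_erase_of_ne hy2 |>.mpr ((PySem.Set.mem_ofList xs y).mp hy1)
      have := (List.subperm_of_subset hnd hsub').length_le
      have hel : (xs.erase x).length = xs.length - 1 := List.length_erase_of_mem hx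
      have hpos := List.length_pos_of_mem hx
      omega
    · have h1 : ((PySem.Set.ofList xs).discard x).length ≤ (PySem.Set.ofList xs).length := by
        have hsub2 : (PySem.Set.ofList xs).discard x ⊆ PySem.Set.ofList xs := fun y hy =>
          ((PySem.Set.mem_discard _ x y).mp hy).1
        exact (List.subperm_of_subset hnd hsub2).length_le
      have := ih hxs
      omega

-- A's duplicate check len(set(c)) == len(c) is exactly Nodup
theorem dupcheck_iff (c : List String) :
    ((PySem.Set.ofList c).length == c.length) = true ↔ c.Nodup := by
  rw [beq_iff_eq]
  constructor
  · intro h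
    by_contra hc
    exact absurd h (Nat.ne_of_lt (ofList_length_lt c hc))
  · intro h; rw [PySem.Set.ofList_eq_self_of_nodup c h]

-- the backtracking output is exactly the sorted duplicate-free product tuples
theorem mem_btRec (cs : List (List String)) (used : List String) (hu : used.Nodup)
    (x : List String) :
    x ∈ btRec cs used ↔
      ∃ comb, comb ∈ pyProduct cs ∧ (used ++ comb).Nodup ∧
        x = PySem.List.sorted (used ++ comb) (fun y => y) false := by
  induction cs generalizing used with
  | nil =>
    simp only [btRec, pyProduct, List.mem_singleton]
    constructor
    · intro hx
      exact ⟨[], rfl, by rw [List.append_nil]; exact hu, by rw [List.append_nil]; exact hx⟩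
    · rintro ⟨comb, rfl, -, rfl⟩
      rw [List.append_nil]
  | cons c cs ih =>
    simp only [btRec, pyProduct, List.mem_flatMap, List.mem_filter, List.mem_map]
    constructor
    · rintro ⟨u, ⟨huc, hnu⟩, hx⟩
      have hnu' : u ∉ used := by simpa using hnu
      have hun : (used ++ [u]).Nodup :=
        (List.perm_append_singleton u used).symm.nodup (List.nodup_cons.mpr ⟨hnu', hu⟩)
      obtain ⟨comb, hc, hn, hxeq⟩ := (ih (used ++ [u]) hun).mp hx
      rw [List.append_assoc] at hn hxeq
      exact ⟨u :: comb, ⟨u, huc, ⟨comb, hc, rfl⟩⟩, hn, hxeq⟩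
    · rintro ⟨comb, ⟨u, huc, ⟨comb', hc', rfl⟩⟩, hn, rfl⟩
      rw [show used ++ u :: comb' = (used ++ [u]) ++ comb' by rw [List.append_assoc]; rfl] at hn
      have hun : (used ++ [u]).Nodup := hn.of_append_left
      have hnu' : u ∉ used :=
        (List.nodup_cons.mp ((List.perm_append_singleton u used).nodup hun)).1
      exact ⟨u, ⟨huc, by simpa using hnu'⟩,
        (ih (used ++ [u]) hun).mpr ⟨comb', hc', hn, by rw [List.append_assoc]; rfl⟩⟩

-- same candidate lists ⇒ same count: A's filtered product set and B's DFS set are permutations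
theorem count_eq (data : List (List String)) :
    (uniqueCombinations data).length = (PySem.Set.ofList (btRec data [])).length := by
  have hA : uniqueCombinations data
      = PySem.Set.ofList
          (((pyProduct data).filter (fun c => (PySem.Set.ofList c).length == c.length)).map
            (fun c => PySem.List.sorted c (fun x => x) false)) := by
    unfold uniqueCombinations
    rw [PySem.List.foldl_if_eq_foldl_filter
        (p := fun c => (PySem.Set.ofList c).length == c.length)
        (f := fun s c => PySem.Set.add s (PySem.List.sorted c (fun x => x) false))]
    rw [← PySem.Set.update_map_eq_foldl_add, PySem.Set.update_nil_left]
  rw [hA]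
  apply List.Perm.length_eq
  rw [List.perm_ext_iff_of_nodup (PySem.Set.nodup_ofList _) (PySem.Set.nodup_ofList _)]
  intro a
  rw [PySem.Set.mem_ofList, PySem.Set.mem_ofList, mem_btRec data [] List.nodup_nil a]
  simp only [List.mem_map, List.mem_filter, List.nil_append]
  constructor
  · rintro ⟨c, ⟨hc, hp⟩, rfl⟩
    exact ⟨c, hc, (dupcheck_iff c).mp hp, rfl⟩
  · rintro ⟨c, hc, hnd, rfl⟩
    exact ⟨c, ⟨hc, (dupcheck_iff c).mpr hnd⟩, rfl⟩

-- ===== VERDICT (by name: the statement is the Claim_ definition above) =====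
theorem solution_spec : Claim_equal_solution := by
  intro user_id banned_id _
  unfold Spec_solution solution solution_alt
  rw [PySem.List.foldl_append_singleton_eq_map, List.nil_append]
  have hinner : ∀ b : String,
      user_id.foldl
        (fun bl u =>
          if PySem.Str.len b == PySem.Str.len u && canBan u.toList b.toList then bl ++ [u]
          else bl) []
      = user_id.filter (fun u =>
          PySem.Str.len u == PySem.Str.len b && matchPat u.toList b.toList) := by
    intro b
    rw [PySem.List.foldl_append_if_eq_filter
        (p := fun u => PySem.Str.len b == PySem.Str.len u && canBan u.toList b.toList),
      List.nil_append]
    exact List.filter_congr (fun u _ => pred_eq u b)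
  rw [List.map_congr_left (fun b _ => hinner b)]
  exact congrArg _ (count_eq _)
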